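-- pv_equiv track=rewrite | github.com/ntxq/PS-Baekjoon | 2000~2999/2616.py | loop
-- ===== SOURCE A (Python) =====
-- def loop(n: int, train: list[int], sublen: int) -> int:
--     dp = [[0] * n for _ in range(3)]
--
--     prefixSum = [0] * n
--     prefixSum[0] = train[0]
--     for i in range(1, n):
--         prefixSum[i] = prefixSum[i-1] + train[i]
--
--     for i in range(3):
--         for j in range((i + 1) * sublen - 1, n):
--             curPop = dp[i-1][j-sublen] if j >= sublen else 0
--             curPop += prefixSum[j] - \
--                 (prefixSum[j-sublen] if j >= sublen else 0)
--             dp[i][j] = max(dp[i][j-1], curPop)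
--
--     return dp[2][n-1]
-- ===== SOURCE B (Python) =====
-- def loop(n: int, train: list[int], sublen: int) -> int:
--     # Pivot on the middle of the three segments: sliding-window sums, a prefix-max
--     # and a suffix-max array, then one sweep over the middle positions.  The
--     # running combination is clamped at 0 at each stage, so a loss-making prefix
--     # of the three segments is dropped.
--     xs = train[:n]
--     k = sublen
--     m = n - k + 1  # number of k-windows
--     w = [sum(xs[:k])]
--     for t in range(1, m):
--         w.append(w[-1] + xs[t + k - 1] - xs[t - 1])
--     pre = [w[0]]
--     for t in range(1, m):
--         pre.append(max(pre[-1], w[t]))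
--     suf = [w[-1]]
--     for t in range(m - 2, -1, -1):
--         suf.append(max(suf[-1], w[t]))
--     suf.reverse()
--     best = 0
--     for v in range(k, m - k):  # middle-segment start
--         left = max(pre[v - k], 0)
--         two = max(left + w[v], 0)
--         best = max(best, two + suf[v + k])
--     return best
-- ===== Notes on version B (the rewrite author's own statement) =====
-- stated objective: alternative
-- what changed: Replaces A's 3xn DP table over prefix sums with a middle-segment pivot: sliding-window sums built once, prefix-max and suffix-max arrays, and one sweep over middle positions combining left-best + middle window + right-best with the running combination clamped at 0; Pre_ excludes inputs where A raises IndexError (n < 1 or n > len(train)) and sublen < 1, outside the natural segment-length domain, where A reads via negative-index wraparound.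
-- outside the precondition, e.g. on loop(2, [3, 4], 0): A returns 7, B returns 0
import Mathlib
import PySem

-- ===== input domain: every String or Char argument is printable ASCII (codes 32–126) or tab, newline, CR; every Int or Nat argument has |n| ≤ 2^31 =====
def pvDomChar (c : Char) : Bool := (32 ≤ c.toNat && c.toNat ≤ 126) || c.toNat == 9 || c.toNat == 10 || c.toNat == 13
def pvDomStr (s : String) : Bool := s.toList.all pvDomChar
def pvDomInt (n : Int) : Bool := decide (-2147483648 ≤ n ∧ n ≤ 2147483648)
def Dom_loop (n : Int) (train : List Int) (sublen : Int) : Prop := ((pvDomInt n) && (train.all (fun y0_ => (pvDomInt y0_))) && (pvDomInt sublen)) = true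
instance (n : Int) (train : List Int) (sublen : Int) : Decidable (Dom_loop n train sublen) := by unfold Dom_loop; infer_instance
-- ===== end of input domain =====

-- B pivots on the middle segment: sliding-window sums, prefix-max and suffix-max arrays, and one
-- sweep over middle positions with the running combination clamped at 0, instead of A's 3×n DP
-- table (objective: alternative decomposition).

-- ===== PORT A =====
-- Indexing is via pyGetD (default never used on Pre_ inputs, where every Python access succeeds).
def loop (n : Int) (train : List Int) (sublen : Int) : Int :=
  let dp : List (List Int) := List.replicate 3 (List.replicate n.toNat 0)
  let prefixSum : List Int := (List.replicate n.toNat 0).set 0 (PySem.List.pyGetD train 0 0)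
  let prefixSum := (PySem.List.pyRange 1 n 1).foldl (fun ps i =>
      ps.set i.toNat (PySem.List.pyGetD ps (i-1) 0 + PySem.List.pyGetD train i 0)) prefixSum
  let dp := (PySem.List.pyRange 0 3 1).foldl (fun dp2 i =>
      (PySem.List.pyRange ((i+1)*sublen - 1) n 1).foldl (fun dpa j =>
        let curPop : Int := if sublen ≤ j then PySem.List.pyGetD (PySem.List.pyGetD dpa (i-1) []) (j - sublen) 0 else 0
        let curPop := curPop + PySem.List.pyGetD prefixSum j 0 -
          (if sublen ≤ j then PySem.List.pyGetD prefixSum (j - sublen) 0 else 0)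
        let row := PySem.List.pyGetD dpa i []
        dpa.set i.toNat (row.set j.toNat (max (PySem.List.pyGetD row (j-1) 0) curPop))) dp2) dp
  PySem.List.pyGetD (PySem.List.pyGetD dp 2 []) (n-1) 0

-- ===== PORT B =====
def loop_alt (n : Int) (train : List Int) (sublen : Int) : Int :=
  let xs := PySem.List.slice train none (some n)
  let k := sublen
  let m := n - k + 1
  let w := (PySem.List.pyRange 1 m 1).foldl (fun w t =>
      w ++ [PySem.List.pyGetD w (-1) 0 + PySem.List.pyGetD xs (t + k - 1) 0 -
        PySem.List.pyGetD xs (t - 1) 0]) [(PySem.List.slice xs none (some k)).sum]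
  let pre := (PySem.List.pyRange 1 m 1).foldl (fun pre t =>
      pre ++ [max (PySem.List.pyGetD pre (-1) 0) (PySem.List.pyGetD w t 0)]) [PySem.List.pyGetD w 0 0]
  let suf := (PySem.List.pyRange (m-2) (-1) (-1)).foldl (fun sf t =>
      sf ++ [max (PySem.List.pyGetD sf (-1) 0) (PySem.List.pyGetD w t 0)]) [PySem.List.pyGetD w (-1) 0]
  let suf := suf.reverse
  (PySem.List.pyRange k (m - k) 1).foldl (fun best v =>
      let left := max (PySem.List.pyGetD pre (v - k) 0) 0
      let two := max (left + PySem.List.pyGetD w v 0) 0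
      max best (two + PySem.List.pyGetD suf (v + k) 0)) 0

-- ===== PRECONDITION & SPEC =====
-- Pre_ excludes: n < 1 or n > len(train) (A raises IndexError) and sublen < 1 (outside the
-- natural segment-length domain: A there raises or reads via negative-index wraparound).
def Pre_loop (n : Int) (train : List Int) (sublen : Int) : Prop :=
  1 ≤ n ∧ n ≤ (train.length : Int) ∧ 1 ≤ sublen
instance (n : Int) (train : List Int) (sublen : Int) : Decidable (Pre_loop n train sublen) := by unfold Pre_loop; infer_instance
def pvWitness_loop : Int × List Int × Int := (7, [4, 1, 5, 2, 3, 1, 4], 2)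

def Spec_loop (n : Int) (train : List Int) (sublen : Int) (out : Int) : Prop := out = loop_alt n train sublen
instance (n : Int) (train : List Int) (sublen : Int) (out : Int) : Decidable (Spec_loop n train sublen out) := by unfold Spec_loop; infer_instance

-- ===== CLAIM (what is proved, stated in full; the proofs are below) =====
def Claim_equal_loop : Prop := ∀ (n : Int) (train : List Int) (sublen : Int), Dom_loop n train sublen → Pre_loop n train sublen → Spec_loop n train sublen (loop n train sublen)

-- ===== LEMMAS AND PROOFS =====

-- ---------- prefix sums and window sums ----------
def psum (train : List Int) (j : Nat) : Int := (train.take (j+1)).sum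
-- window sum by END index j (what A's prefixSum subtraction computes)
def wendf (train : List Int) (K : Nat) (j : Nat) : Int :=
  psum train j - (if K ≤ j then psum train (j - K) else 0)
-- window sum by START index u
def wsf (train : List Int) (K : Nat) (u : Nat) : Int :=
  psum train (u + K - 1) - (if 1 ≤ u then psum train (u - 1) else 0)

-- ---------- A-side row recurrence: dp[level][j] after that level's pass ----------
def dA (K : Nat) (W : Nat → Int) (th : Nat) (dprev : Nat → Int) : Nat → Int
  | 0 => if 2 ≤ th then 0 else max 0 (dprev (0 - K) + W 0)
  | j+1 => if j+3 ≤ th then 0 else max (dA K W th dprev j) (dprev (j+1-K) + W (j+1))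

-- ---------- B-side scan recurrences ----------
def pmax (ws : Nat → Int) : Nat → Int
  | 0 => ws 0
  | u+1 => max (pmax ws u) (ws (u+1))
def revf (ws : Nat → Int) (t : Nat) : Nat → Int
  | 0 => ws t
  | k+1 => max (revf ws t k) (ws (t - (k+1)))

-- ---------- maxima specifications ----------
def IsNMax (S : Set Int) (v : Int) : Prop := v ∈ S ∧ ∀ x ∈ S, x ≤ v
def IsCMax (S : Set Int) (v : Int) : Prop := 0 ≤ v ∧ (v = 0 ∨ v ∈ S) ∧ ∀ x ∈ S, x ≤ v

def S1 (ws : Nat → Int) (c b : Nat) : Set Int := {x | ∃ u, c ≤ u ∧ u < b ∧ x = ws u}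
def S2 (ws : Nat → Int) (K cu bu bv : Nat) : Set Int :=
  {x | ∃ u v, cu ≤ u ∧ u < bu ∧ u + K ≤ v ∧ v < bv ∧ x = ws u + ws v}
def S3 (ws : Nat → Int) (K bv bt : Nat) : Set Int :=
  {x | ∃ u v t, u + K ≤ v ∧ v < bv ∧ v + K ≤ t ∧ t < bt ∧ x = ws u + ws v + ws t}

theorem cmax_unique {S : Set Int} {v w : Int} (hv : IsCMax S v) (hw : IsCMax S w) : v = w := by
  obtain ⟨hv0, hvm, hvub⟩ := hv
  obtain ⟨hw0, hwm, hwub⟩ := hw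
  rcases hvm with h | h <;> rcases hwm with h' | h'
  · omega
  · subst h; exact le_antisymm hw0 (hvub _ h')
  · subst h'; exact le_antisymm (hwub _ h) hv0
  · exact le_antisymm (hwub _ h) (hvub _ h')

theorem cmax_empty : IsCMax (∅ : Set Int) 0 := ⟨le_refl 0, Or.inl rfl, by simp⟩

theorem cmax_congr {S T : Set Int} {v : Int} (h : S = T) (hv : IsCMax S v) : IsCMax T v := h ▸ hv

theorem nmax_union {S T : Set Int} {v w : Int} (hv : IsNMax S v) (hw : IsNMax T w) :
    IsNMax (S ∪ T) (max v w) := by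
  constructor
  · rcases le_total v w with h | h
    · simp only [max_eq_right h]; exact Or.inr hw.1
    · simp only [max_eq_left h]; exact Or.inl hv.1
  · rintro x (hx | hx)
    · exact le_trans (hv.2 x hx) (le_max_left _ _)
    · exact le_trans (hw.2 x hx) (le_max_right _ _)

theorem cmax_union_nmax {S T : Set Int} {v w : Int} (hv : IsCMax S v) (hw : IsNMax T w) :
    IsCMax (S ∪ T) (max v w) := by
  refine ⟨le_trans hv.1 (le_max_left _ _), ?_, ?_⟩
  · rcases le_total v w with h | h
    · simp only [max_eq_right h]; exact Or.inr (Or.inr hw.1)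
    · simp only [max_eq_left h]; rcases hv.2.1 with h' | h'
      · exact Or.inl h'
      · exact Or.inr (Or.inl h')
  · rintro x (hx | hx)
    · exact le_trans (hv.2.2 x hx) (le_max_left _ _)
    · exact le_trans (hw.2 x hx) (le_max_right _ _)

theorem cmax_max_zero {S : Set Int} {v : Int} (hv : IsNMax S v) : IsCMax S (max 0 v) := by
  refine ⟨le_max_left _ _, ?_, fun x hx => le_trans (hv.2 x hx) (le_max_right _ _)⟩
  rcases le_total v 0 with h | h
  · exact Or.inl (by omega)
  · simp only [max_eq_right h]; exact Or.inr hv.1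

-- A's step adds {W j} ∪ (S + W j) (a clamped previous level plus the new window)
theorem nmax_cshift {S : Set Int} {v : Int} (c : Int) (hv : IsCMax S v) :
    IsNMax {x | x = c ∨ ∃ y ∈ S, x = y + c} (v + c) := by
  constructor
  · rcases hv.2.1 with h | h
    · exact Or.inl (by omega)
    · exact Or.inr ⟨v, h, rfl⟩
  · rintro x (rfl | ⟨y, hy, rfl⟩)
    · have := hv.1; omega
    · have := hv.2.2 y hy; omega

theorem nmax_shift_left {S : Set Int} {v : Int} (c : Int) (hv : IsNMax S v) :
    IsNMax {x | ∃ y ∈ S, x = c + y} (c + v) := by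
  exact ⟨⟨v, hv.1, rfl⟩, by rintro x ⟨y, hy, rfl⟩; have := hv.2 y hy; omega⟩

theorem nmax_add_mid {S T : Set Int} {a b : Int} (c : Int) (ha : IsNMax S a) (hb : IsNMax T b) :
    IsNMax {x | ∃ y ∈ S, ∃ z ∈ T, x = y + c + z} (a + c + b) := by
  refine ⟨⟨a, ha.1, b, hb.1, rfl⟩, ?_⟩
  rintro x ⟨y, hy, z, hz, rfl⟩
  have := ha.2 y hy; have := hb.2 z hz; omega

theorem nmax_singleton (c : Int) : IsNMax {c} c :=
  ⟨rfl, by rintro x rfl; exact le_refl _⟩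

-- ---------- set algebra for S1/S2/S3 ----------
theorem S1_empty (ws : Nat → Int) (c b : Nat) (h : b ≤ c) : S1 ws c b = ∅ := by
  ext x
  simp only [S1, Set.mem_setOf_eq, Set.mem_empty_iff_false, iff_false]
  rintro ⟨u, h1, h2, hx⟩
  omega

theorem S2_empty (ws : Nat → Int) (K cu bu bv : Nat) (h : bv ≤ cu + K) :
    S2 ws K cu bu bv = ∅ := by
  ext x
  simp only [S2, Set.mem_setOf_eq, Set.mem_empty_iff_false, iff_false]
  rintro ⟨u, v, h1, h2, h3, h4, hx⟩
  omega

theorem S2_empty_bu (ws : Nat → Int) (K cu bu bv : Nat) (h : bu ≤ cu) :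
    S2 ws K cu bu bv = ∅ := by
  ext x
  simp only [S2, Set.mem_setOf_eq, Set.mem_empty_iff_false, iff_false]
  rintro ⟨u, v, h1, h2, h3, h4, hx⟩
  omega

theorem S3_empty (ws : Nat → Int) (K bv bt : Nat) (h : bt ≤ 2*K) :
    S3 ws K bv bt = ∅ := by
  ext x
  simp only [S3, Set.mem_setOf_eq, Set.mem_empty_iff_false, iff_false]
  rintro ⟨u, v, t, h1, h2, h3, h4, hx⟩
  omega

theorem S3_empty_bv (ws : Nat → Int) (K bv bt : Nat) (h : bv ≤ K) :
    S3 ws K bv bt = ∅ := by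
  ext x
  simp only [S3, Set.mem_setOf_eq, Set.mem_empty_iff_false, iff_false]
  rintro ⟨u, v, t, h1, h2, h3, h4, hx⟩
  omega

theorem S1_snoc (ws : Nat → Int) (c b : Nat) (h : c ≤ b) :
    S1 ws c (b+1) = S1 ws c b ∪ {ws b} := by
  ext x
  simp only [S1, Set.mem_union, Set.mem_singleton_iff, Set.mem_setOf_eq]
  constructor
  · rintro ⟨u, h1, h2, rfl⟩
    by_cases hu : u = b
    · subst hu; exact Or.inr rfl
    · exact Or.inl ⟨u, h1, by omega, rfl⟩
  · rintro (⟨u, h1, h2, rfl⟩ | rfl)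
    · exact ⟨u, h1, by omega, rfl⟩
    · exact ⟨b, h, by omega, rfl⟩

theorem S2_eq_wide (ws : Nat → Int) (K bu bu' M : Nat) (h : M ≤ bu + K) (h' : M ≤ bu' + K) :
    S2 ws K K bu M = S2 ws K K bu' M := by
  ext x
  simp only [S2, Set.mem_setOf_eq]
  constructor
  · rintro ⟨u, v, h1, h2, h3, h4, rfl⟩
    exact ⟨u, v, h1, by omega, h3, h4, rfl⟩
  · rintro ⟨u, v, h1, h2, h3, h4, rfl⟩
    exact ⟨u, v, h1, by omega, h3, h4, rfl⟩

theorem S3_eq_wide (ws : Nat → Int) (K bv bv' M : Nat) (h : M ≤ bv + K) (h' : M ≤ bv' + K) :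
    S3 ws K bv M = S3 ws K bv' M := by
  ext x
  simp only [S3, Set.mem_setOf_eq]
  constructor
  · rintro ⟨u, v, t, h1, h2, h3, h4, rfl⟩
    exact ⟨u, v, t, h1, by omega, h3, h4, rfl⟩
  · rintro ⟨u, v, t, h1, h2, h3, h4, rfl⟩
    exact ⟨u, v, t, h1, by omega, h3, h4, rfl⟩

theorem d1_step_sets (ws : Nat → Int) (K j : Nat) (hK : 1 ≤ K) (h : 2*K ≤ j+2) :
    ((S1 ws K (j+2-K) ∪ S2 ws K 0 (j+2-K) (j+2-K)) ∪
      {x | x = ws (j+2-K) ∨ ∃ y ∈ S1 ws 0 (j+3-2*K), x = y + ws (j+2-K)})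
    = S1 ws K (j+3-K) ∪ S2 ws K 0 (j+3-K) (j+3-K) := by
  ext x
  simp only [S1, S2, Set.mem_union, Set.mem_setOf_eq]
  constructor
  · rintro ((⟨u, h1, h2, rfl⟩ | ⟨u, v, h1, h2, h3, h4, rfl⟩) | (rfl | ⟨y, ⟨u, h1, h2, rfl⟩, rfl⟩))
    · exact Or.inl ⟨u, h1, by omega, rfl⟩
    · exact Or.inr ⟨u, v, h1, by omega, h3, by omega, rfl⟩
    · exact Or.inl ⟨j+2-K, by omega, by omega, rfl⟩
    · exact Or.inr ⟨u, j+2-K, by omega, by omega, by omega, by omega, rfl⟩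
  · rintro (⟨u, h1, h2, rfl⟩ | ⟨u, v, h1, h2, h3, h4, rfl⟩)
    · by_cases hu : u = j+2-K
      · subst hu; exact Or.inr (Or.inl rfl)
      · exact Or.inl (Or.inl ⟨u, h1, by omega, rfl⟩)
    · by_cases hv : v = j+2-K
      · subst hv; exact Or.inr (Or.inr ⟨ws u, ⟨u, by omega, by omega, rfl⟩, rfl⟩)
      · exact Or.inl (Or.inr ⟨u, v, h1, by omega, h3, by omega, rfl⟩)

theorem d2_step_sets (ws : Nat → Int) (K j : Nat) (hK : 1 ≤ K) (h : 3*K ≤ j+2) :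
    ((S1 ws (2*K) (j+2-K) ∪ S2 ws K K (j+2-K) (j+2-K) ∪ S3 ws K (j+2-K) (j+2-K)) ∪
      {x | x = ws (j+2-K) ∨
        ∃ y ∈ S1 ws K (j+3-2*K) ∪ S2 ws K 0 (j+3-2*K) (j+3-2*K), x = y + ws (j+2-K)})
    = S1 ws (2*K) (j+3-K) ∪ S2 ws K K (j+3-K) (j+3-K) ∪ S3 ws K (j+3-K) (j+3-K) := by
  ext x
  simp only [S1, S2, S3, Set.mem_union, Set.mem_setOf_eq]
  constructor
  · rintro (((⟨u, h1, h2, rfl⟩ | ⟨u, v, h1, h2, h3, h4, rfl⟩) | ⟨u, v, t, h1, h2, h3, h4, rfl⟩)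
      | (rfl | ⟨y, (⟨u, h1, h2, rfl⟩ | ⟨u, v, h1, h2, h3, h4, rfl⟩), rfl⟩))
    · exact Or.inl (Or.inl ⟨u, h1, by omega, rfl⟩)
    · exact Or.inl (Or.inr ⟨u, v, h1, by omega, h3, by omega, rfl⟩)
    · exact Or.inr ⟨u, v, t, h1, by omega, h3, by omega, rfl⟩
    · exact Or.inl (Or.inl ⟨j+2-K, by omega, by omega, rfl⟩)
    · exact Or.inl (Or.inr ⟨u, j+2-K, by omega, by omega, by omega, by omega, rfl⟩)
    · exact Or.inr ⟨u, v, j+2-K, by omega, by omega, by omega, by omega, rfl⟩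
  · rintro ((⟨u, h1, h2, rfl⟩ | ⟨u, v, h1, h2, h3, h4, rfl⟩) | ⟨u, v, t, h1, h2, h3, h4, rfl⟩)
    · by_cases hu : u = j+2-K
      · subst hu; exact Or.inr (Or.inl rfl)
      · exact Or.inl (Or.inl (Or.inl ⟨u, h1, by omega, rfl⟩))
    · by_cases hv : v = j+2-K
      · subst hv
        exact Or.inr (Or.inr ⟨ws u, Or.inl ⟨u, h1, by omega, rfl⟩, rfl⟩)
      · exact Or.inl (Or.inl (Or.inr ⟨u, v, h1, by omega, h3, by omega, rfl⟩))
    · by_cases ht : t = j+2-K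
      · subst ht
        exact Or.inr (Or.inr ⟨ws u + ws v, Or.inr ⟨u, v, by omega, by omega, by omega, by omega, rfl⟩, rfl⟩)
      · exact Or.inl (Or.inr ⟨u, v, t, h1, by omega, h3, by omega, rfl⟩)

-- B's step at middle position K+T adds a clamped suffix/pair/triple bundle
theorem best_step_sets' (ws : Nat → Int) (K M T : Nat) (hK : 1 ≤ K) (h : 2*K + T + 1 ≤ M) :
    (((if T = 0 then (∅ : Set Int) else S1 ws (2*K) M) ∪ S2 ws K K (K+T) M ∪ S3 ws K (K+T) M) ∪
      ((S1 ws (2*K+T) M ∪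
        {x | ∃ y ∈ S1 ws (2*K+T) M, x = ws (K+T) + y}) ∪
        {x | ∃ y ∈ S1 ws 0 (T+1), ∃ z ∈ S1 ws (2*K+T) M, x = y + ws (K+T) + z}))
    = S1 ws (2*K) M ∪ S2 ws K K (K+T+1) M ∪ S3 ws K (K+T+1) M := by
  ext x
  simp only [S1, S2, S3, Set.mem_union, Set.mem_setOf_eq]
  constructor
  · rintro (((h0 | ⟨u, v, h1, h2, h3, h4, rfl⟩) | ⟨u, v, t, h1, h2, h3, h4, rfl⟩)
      | ((⟨u, h1, h2, rfl⟩ | ⟨y, ⟨v, h1, h2, rfl⟩, rfl⟩) | ⟨y, ⟨u, h1, h2, rfl⟩, z, ⟨t, h3, h4, rfl⟩, rfl⟩))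
    · by_cases hT : T = 0
      · rw [if_pos hT] at h0; exact absurd h0 (Set.notMem_empty x)
      · rw [if_neg hT] at h0
        obtain ⟨u, h1, h2, rfl⟩ := h0
        exact Or.inl (Or.inl ⟨u, h1, h2, rfl⟩)
    · exact Or.inl (Or.inr ⟨u, v, h1, by omega, h3, h4, rfl⟩)
    · exact Or.inr ⟨u, v, t, h1, by omega, h3, h4, rfl⟩
    · exact Or.inl (Or.inl ⟨u, by omega, h2, rfl⟩)
    · exact Or.inl (Or.inr ⟨K+T, v, by omega, by omega, by omega, h2, rfl⟩)
    · exact Or.inr ⟨u, K+T, t, by omega, by omega, by omega, h4, rfl⟩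
  · rintro ((⟨u, h1, h2, rfl⟩ | ⟨u, v, h1, h2, h3, h4, rfl⟩) | ⟨u, v, t, h1, h2, h3, h4, rfl⟩)
    · by_cases hT : T = 0
      · subst hT
        exact Or.inr (Or.inl (Or.inl ⟨u, by omega, h2, rfl⟩))
      · rw [if_neg hT]
        exact Or.inl (Or.inl (Or.inl ⟨u, h1, h2, rfl⟩))
    · by_cases hu : u = K+T
      · subst hu
        exact Or.inr (Or.inl (Or.inr ⟨ws v, ⟨v, by omega, h4, rfl⟩, rfl⟩))
      · exact Or.inl (Or.inl (Or.inr ⟨u, v, h1, by omega, h3, h4, rfl⟩))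
    · by_cases hv : v = K+T
      · subst hv
        exact Or.inr (Or.inr ⟨ws u, ⟨u, by omega, by omega, rfl⟩, ws t, ⟨t, by omega, h4, rfl⟩, rfl⟩)
      · exact Or.inl (Or.inr ⟨u, v, t, h1, by omega, h3, h4, rfl⟩)

-- ---------- basic index facts ----------
theorem wend_eq_ws (train : List Int) (K : Nat) (hK : 1 ≤ K) (j : Nat) (hj : K ≤ j + 1) :
    wendf train K j = wsf train K (j + 1 - K) := by
  unfold wendf wsf
  have h1 : j + 1 - K + K - 1 = j := by omega
  rw [h1]
  by_cases h : K ≤ j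
  · rw [if_pos h, if_pos (by omega : 1 ≤ j + 1 - K)]
    have : j + 1 - K - 1 = j - K := by omega
    rw [this]
  · rw [if_neg h, if_neg (by omega : ¬ 1 ≤ j + 1 - K)]

theorem psum_succ (train : List Int) (j : Nat) (h : j + 1 < train.length) :
    psum train (j+1) = psum train j + train[j+1] := by
  unfold psum
  rw [List.take_add_one, List.sum_append]
  simp [List.getElem?_eq_getElem h]

theorem pyGetD_replicate_zero (n : Nat) (i : Int) :
    PySem.List.pyGetD (List.replicate n (0:Int)) i 0 = 0 := by
  unfold PySem.List.pyGetD
  cases h : PySem.List.pyGet? (List.replicate n (0:Int)) i with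
  | none => rfl
  | some x =>
      have hm := PySem.List.mem_of_pyGet?_eq_some (xs := List.replicate n (0:Int)) (i := i) (x := x) h
      simpa using List.eq_of_mem_replicate hm

theorem set_map_range {N : Nat} (f : Nat → Int) (i : Nat) (v : Int) :
    ((List.range N).map f).set i v =
      (List.range N).map (fun j => if j = i then v else f j) := by
  apply List.ext_getElem
  · simp
  · intro k h1 h2
    simp only [List.getElem_set, List.getElem_map, List.getElem_range]
    by_cases hk : i = k
    · subst hk; simp
    · rw [if_neg hk, if_neg (fun h => hk h.symm)]

theorem getD_map_range' {N k : Nat} (f : Nat → Int) (d : Int) (h : k < N) :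
    ((List.range N).map f).getD k d = f k := by
  rw [List.getD_eq_getElem _ _ (by simpa using h)]
  simp

def zeroRow (N : Nat) : List Int := (List.range N).map (fun _ => 0)
def rowOf (N : Nat) (f : Nat → Int) (e : Int) : List Int :=
  (List.range N).map (fun (idx : Nat) => if (idx:Int) < e then f idx else 0)
def fullRow (N : Nat) (f : Nat → Int) : List Int := (List.range N).map f

theorem psum_zero (train : List Int) (h : 0 < train.length) : psum train 0 = train[0] := by
  unfold psum
  rw [List.take_add_one, List.sum_append]
  simp [List.getElem?_eq_getElem h, List.take_zero]

theorem zeroRow_eq_replicate (N : Nat) : zeroRow N = List.replicate N 0 := by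
  unfold zeroRow
  apply List.ext_getElem <;> simp

theorem zeroRow_getD (N : Nat) (i : Int) : PySem.List.pyGetD (zeroRow N) i 0 = 0 := by
  rw [zeroRow_eq_replicate]; exact pyGetD_replicate_zero N i

-- A's prefixSum pass
theorem prefix_fold_aux (train : List Int) (N : Nat) (hN : 1 ≤ N) (hNl : N ≤ train.length)
    (T : Nat) (hT : T + 1 ≤ N) :
    (List.range T).foldl (fun ps k =>
      ps.set ((1:Int)+(k:Int)).toNat (PySem.List.pyGetD ps ((1:Int)+(k:Int)-1) 0 +
        PySem.List.pyGetD train ((1:Int)+(k:Int)) 0))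
      ((List.range N).map (fun j => if j ≤ 0 then psum train j else 0)) =
    (List.range N).map (fun j => if j ≤ T then psum train j else 0) := by
  induction T with
  | zero => simp
  | succ T ih =>
      rw [List.range_succ, List.foldl_append, ih (by omega)]
      simp only [List.foldl_cons, List.foldl_nil]
      have e1 : ((1:Int)+(T:Int)).toNat = T + 1 := by omega
      have e2 : (1:Int)+(T:Int)-1 = ((T:Nat):Int) := by omega
      have e3 : PySem.List.pyGetD ((List.range N).map (fun j => if j ≤ T then psum train j else 0)) ((T:Nat):Int) 0
          = psum train T := by
        rw [PySem.List.pyGetD_natCast, getD_map_range' _ _ (by omega)]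
        simp
      have e4 : PySem.List.pyGetD train ((1:Int)+(T:Int)) 0 = train[T+1]'(by omega) := by
        rw [show (1:Int)+(T:Int) = ((T+1:Nat):Int) by omega, PySem.List.pyGetD_natCast,
          List.getD_eq_getElem _ _ (by omega)]
      rw [e1, e2, e3, e4, set_map_range]
      apply List.map_congr_left
      intro j hj
      simp only [List.mem_range] at hj
      by_cases hjT : j = T + 1
      · subst hjT
        rw [if_pos rfl, if_pos (by omega)]
        rw [psum_succ train T (by omega)]
      · rw [if_neg hjT]
        by_cases h5 : j ≤ T
        · rw [if_pos h5, if_pos (by omega)]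
        · rw [if_neg h5, if_neg (by omega)]

theorem prefix_char (train : List Int) (n : Int) (h1 : 1 ≤ n) (h2 : n ≤ (train.length : Int)) :
    ((PySem.List.pyRange 1 n 1).foldl (fun ps i =>
      ps.set i.toNat (PySem.List.pyGetD ps (i-1) 0 + PySem.List.pyGetD train i 0))
      ((List.replicate n.toNat 0).set 0 (PySem.List.pyGetD train 0 0))) =
    (List.range n.toNat).map (psum train) := by
  have hN : 1 ≤ n.toNat := by omega
  have hNl : n.toNat ≤ train.length := by omega
  have hinit : (List.replicate n.toNat (0:Int)).set 0 (PySem.List.pyGetD train 0 0)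
      = (List.range n.toNat).map (fun j => if j ≤ 0 then psum train j else 0) := by
    rw [← zeroRow_eq_replicate, zeroRow, set_map_range]
    apply List.map_congr_left
    intro j hj
    simp only [List.mem_range] at hj
    by_cases hj0 : j = 0
    · subst hj0
      rw [if_pos rfl, if_pos (by omega)]
      rw [PySem.List.pyGetD_eq_getElem _ _ (by omega) (by exact_mod_cast by omega), psum_zero train (by omega)]
      simp
    · rw [if_neg hj0, if_neg (by omega)]
  rw [hinit, PySem.List.pyRange_one, List.foldl_map,
    prefix_fold_aux train n.toNat hN hNl (n-1).toNat (by omega)]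
  apply List.map_congr_left
  intro j hj
  simp only [List.mem_range] at hj
  rw [if_pos (by omega)]

-- one level of A's dp pass (abstract over which rows; stated for the concrete 3-row shapes below)
theorem dA_zero_of_lt (K : Nat) (W : Nat → Int) (th : Nat) (dprev : Nat → Int) (j : Nat)
    (h : j + 2 ≤ th) : dA K W th dprev j = 0 := by
  cases j with
  | zero => simp [dA, show 2 ≤ th by omega]
  | succ j => simp [dA, show j + 3 ≤ th by omega]

def dAprev (K : Nat) (W : Nat → Int) (th : Nat) (dprev : Nat → Int) : Nat → Int
  | 0 => 0
  | jj+1 => dA K W th dprev jj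

theorem dA_active (K : Nat) (W : Nat → Int) (th : Nat) (dprev : Nat → Int) (j : Nat)
    (h : th ≤ j + 1) :
    dA K W th dprev j = max (dAprev K W th dprev j) (dprev (j - K) + W j) := by
  cases j with
  | zero => simp [dA, dAprev, show ¬ 2 ≤ th by omega]
  | succ j => simp [dA, dAprev, show ¬ j + 3 ≤ th by omega]

-- small literal-list helpers (kernel-transparent)
theorem get3_0 {α : Type} (x y z : α) (d : α) : PySem.List.pyGetD [x,y,z] 0 d = x := rfl
theorem get3_2 {α : Type} (x y z : α) (d : α) : PySem.List.pyGetD [x,y,z] 2 d = z := rfl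
theorem get3_sub0 {α : Type} (x y z : α) (d : α) : PySem.List.pyGetD [x,y,z] ((0:Int)-1) d = z := rfl
theorem get3_sub1 {α : Type} (x y z : α) (d : α) : PySem.List.pyGetD [x,y,z] ((1:Int)-1) d = x := rfl
theorem get3_sub2 {α : Type} (x y z : α) (d : α) : PySem.List.pyGetD [x,y,z] ((2:Int)-1) d = y := rfl
theorem get3_i1 {α : Type} (x y z : α) (d : α) : PySem.List.pyGetD [x,y,z] 1 d = y := rfl
theorem set3_0 {α : Type} (x y z w : α) : List.set [x,y,z] (0:Int).toNat w = [w,y,z] := rfl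
theorem set3_1 {α : Type} (x y z w : α) : List.set [x,y,z] (1:Int).toNat w = [x,w,z] := rfl
theorem set3_2 {α : Type} (x y z w : α) : List.set [x,y,z] (2:Int).toNat w = [x,y,w] := rfl

theorem rowOf_getD (N : Nat) (f : Nat → Int) (e i : Int) (h0 : 0 ≤ i) (h1 : i < (N:Int)) :
    PySem.List.pyGetD (rowOf N f e) i 0 = if i < e then f i.toNat else 0 := by
  have hlen : i < (((rowOf N f e).length : Nat) : Int) := by
    simp only [rowOf, List.length_map, List.length_range]; omega
  rw [PySem.List.pyGetD_eq_getElem _ _ h0 hlen]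
  simp only [rowOf, List.getElem_map, List.getElem_range]
  rw [Int.toNat_of_nonneg h0]

theorem fullRow_getD (N : Nat) (f : Nat → Int) (i : Int) (h0 : 0 ≤ i) (h1 : i < (N:Int)) :
    PySem.List.pyGetD (fullRow N f) i 0 = f i.toNat := by
  have hlen : i < (((fullRow N f).length : Nat) : Int) := by
    simp only [fullRow, List.length_map, List.length_range]; omega
  rw [PySem.List.pyGetD_eq_getElem _ _ h0 hlen]
  simp only [fullRow, List.getElem_map, List.getElem_range]

theorem rowOf_full (N : Nat) (f : Nat → Int) (e : Int) (he : (N:Int) ≤ e) :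
    rowOf N f e = fullRow N f := by
  apply List.map_congr_left
  intro idx hidx
  simp only [List.mem_range] at hidx
  rw [if_pos (by omega)]

theorem rowOf_init (N : Nat) (f : Nat → Int) (s : Int)
    (hz : ∀ idx : Nat, (idx:Int) < s → f idx = 0) : rowOf N f s = zeroRow N := by
  apply List.map_congr_left
  intro idx hidx
  by_cases h : (idx:Int) < s
  · rw [if_pos h, hz idx h]
  · rw [if_neg h]

-- one pass of A's dp loop, level i=0
theorem level0_aux (train : List Int) (n : Int) (N K : Nat) (hN : N = n.toNat)
    (h1 : 1 ≤ n) (h2 : n ≤ (train.length : Int)) (hK : 1 ≤ K) (s : Int) (hs : s = (K:Int) - 1)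
    (T : Nat) (hT : 0 < T → s + (T:Int) ≤ n) :
    (List.range T).foldl (fun dpa (k : Nat) =>
      dpa.set (0:Int).toNat
        ((PySem.List.pyGetD dpa 0 []).set (s + (k:Int)).toNat
          (max (PySem.List.pyGetD (PySem.List.pyGetD dpa 0 []) (s + (k:Int) - 1) 0)
            ((if (K:Int) ≤ s + (k:Int) then
                PySem.List.pyGetD (PySem.List.pyGetD dpa ((0:Int)-1) []) (s + (k:Int) - (K:Int)) 0
              else 0)
              + PySem.List.pyGetD (fullRow N (psum train)) (s + (k:Int)) 0
              - (if (K:Int) ≤ s + (k:Int) then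
                  PySem.List.pyGetD (fullRow N (psum train)) (s + (k:Int) - (K:Int)) 0
                else 0)))))
      [zeroRow N, zeroRow N, zeroRow N]
    = [rowOf N (dA K (wendf train K) K (fun _ => 0)) (s + (T:Int)), zeroRow N, zeroRow N] := by
  induction T with
  | zero =>
      simp only [List.range_zero, List.foldl_nil]
      rw [rowOf_init N _ (s + ((0:Nat):Int)) (fun idx hidx => dA_zero_of_lt K _ K _ idx (by omega))]
  | succ T ih =>
      rw [List.range_succ, List.foldl_append, ih (fun _ => by
        have := hT (by omega); push_cast at this ⊢; omega)]
      simp only [List.foldl_cons, List.foldl_nil]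
      have hjlt : s + (T:Int) < n := by have := hT (by omega); push_cast at this; omega
      have hj0 : 0 ≤ s + (T:Int) := by omega
      rw [get3_0, get3_sub0, set3_0, zeroRow_getD, ite_self]
      rw [fullRow_getD N _ _ hj0 (by omega)]
      simp only [List.cons.injEq, and_true]
      have hsubst : (if (K:Int) ≤ s + (T:Int) then PySem.List.pyGetD (fullRow N (psum train)) (s + (T:Int) - (K:Int)) 0 else 0)
          = (if K ≤ (s + (T:Int)).toNat then psum train ((s + (T:Int)).toNat - K) else 0) := by
        by_cases hg : (K:Int) ≤ s + (T:Int)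
        · rw [if_pos hg, if_pos (by omega), fullRow_getD N _ _ (by omega) (by omega)]
          congr 1
          omega
        · rw [if_neg hg, if_neg (by omega)]
      have hprev : PySem.List.pyGetD (rowOf N (dA K (wendf train K) K (fun _ => 0)) (s + (T:Int))) (s + (T:Int) - 1) 0
          = dAprev K (wendf train K) K (fun _ => 0) (s + (T:Int)).toNat := by
        by_cases hj1 : (1:Int) ≤ s + (T:Int)
        · rw [rowOf_getD N _ _ _ (by omega) (by omega), if_pos (by omega)]
          rw [show (s + (T:Int)).toNat = (s + (T:Int) - 1).toNat + 1 from by omega]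
          rfl
        · rw [show s + (T:Int) - 1 = -1 from by omega,
            show (s + (T:Int)).toNat = 0 from by omega,
            rowOf_init N _ _ (fun idx hidx => absurd hidx (by omega))]
          rw [zeroRow_eq_replicate]
          rw [pyGetD_replicate_zero]
          rfl
      have hread : max (PySem.List.pyGetD (rowOf N (dA K (wendf train K) K fun _ => 0) (s + (T:Int))) (s + (T:Int) - 1) 0)
            ((0:Int) + psum train (s + (T:Int)).toNat -
              if (K:Int) ≤ s + (T:Int) then PySem.List.pyGetD (fullRow N (psum train)) (s + (T:Int) - (K:Int)) 0 else 0)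
          = dA K (wendf train K) K (fun _ => 0) (s + (T:Int)).toNat := by
        rw [dA_active K (wendf train K) K (fun _ => 0) (s + (T:Int)).toNat (by omega), hprev, hsubst]
        congr 1
        unfold wendf
        omega
      rw [hread, rowOf, set_map_range]
      apply List.map_congr_left
      intro idx hidx
      simp only [List.mem_range] at hidx
      by_cases hi : idx = (s + (T:Int)).toNat
      · subst hi
        rw [if_pos rfl, if_pos (by push_cast; omega)]
      · rw [if_neg hi]
        by_cases hlt : (idx:Int) < s + (T:Int)
        · rw [if_pos hlt, if_pos (by push_cast; omega)]
        · rw [if_neg hlt, if_neg (by push_cast; omega)]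

-- one pass of A's dp loop, level i=1
theorem level1_aux (train : List Int) (n : Int) (N K : Nat) (hN : N = n.toNat)
    (h1 : 1 ≤ n) (h2 : n ≤ (train.length : Int)) (hK : 1 ≤ K) (s : Int) (hs : s = 2*(K:Int) - 1)
    (T : Nat) (hT : 0 < T → s + (T:Int) ≤ n) :
    (List.range T).foldl (fun dpa (k : Nat) =>
      dpa.set (1:Int).toNat
        ((PySem.List.pyGetD dpa 1 []).set (s + (k:Int)).toNat
          (max (PySem.List.pyGetD (PySem.List.pyGetD dpa 1 []) (s + (k:Int) - 1) 0)
            ((if (K:Int) ≤ s + (k:Int) then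
                PySem.List.pyGetD (PySem.List.pyGetD dpa ((1:Int)-1) []) (s + (k:Int) - (K:Int)) 0
              else 0)
              + PySem.List.pyGetD (fullRow N (psum train)) (s + (k:Int)) 0
              - (if (K:Int) ≤ s + (k:Int) then
                  PySem.List.pyGetD (fullRow N (psum train)) (s + (k:Int) - (K:Int)) 0
                else 0)))))
      [fullRow N (dA K (wendf train K) K (fun _ => 0)), zeroRow N, zeroRow N]
    = [fullRow N (dA K (wendf train K) K (fun _ => 0)), rowOf N (dA K (wendf train K) (2*K) (dA K (wendf train K) K (fun _ => 0))) (s + (T:Int)), zeroRow N] := by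
  induction T with
  | zero =>
      simp only [List.range_zero, List.foldl_nil]
      rw [rowOf_init N _ (s + ((0:Nat):Int)) (fun idx hidx => dA_zero_of_lt K _ _ _ idx (by omega))]
  | succ T ih =>
      rw [List.range_succ, List.foldl_append, ih (fun _ => by
        have := hT (by omega); push_cast at this ⊢; omega)]
      simp only [List.foldl_cons, List.foldl_nil]
      have hjlt : s + (T:Int) < n := by have := hT (by omega); push_cast at this; omega
      have hj1 : (1:Int) ≤ s + (T:Int) := by omega
      rw [get3_i1, get3_sub1, set3_1]
      rw [if_pos (show (K:Int) ≤ s + (T:Int) from by omega)]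
      rw [fullRow_getD N (dA K (wendf train K) K (fun _ => 0)) (s + (T:Int) - (K:Int)) (by omega) (by omega)]
      rw [fullRow_getD N (psum train) (s + (T:Int)) (by omega) (by omega)]
      simp only [List.cons.injEq, eq_self_iff_true, true_and, and_true]
      have hsubst : (if (K:Int) ≤ s + (T:Int) then PySem.List.pyGetD (fullRow N (psum train)) (s + (T:Int) - (K:Int)) 0 else 0)
          = (if K ≤ (s + (T:Int)).toNat then psum train ((s + (T:Int)).toNat - K) else 0) := by
        rw [if_pos (show (K:Int) ≤ s + (T:Int) from by omega), if_pos (by omega),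
          fullRow_getD N _ _ (by omega) (by omega)]
        congr 1
        omega
      have hprev : PySem.List.pyGetD (rowOf N (dA K (wendf train K) (2*K) (dA K (wendf train K) K (fun _ => 0))) (s + (T:Int))) (s + (T:Int) - 1) 0
          = dAprev K (wendf train K) (2*K) (dA K (wendf train K) K (fun _ => 0)) (s + (T:Int)).toNat := by
        rw [rowOf_getD N _ _ _ (by omega) (by omega), if_pos (by omega)]
        rw [show (s + (T:Int)).toNat = (s + (T:Int) - 1).toNat + 1 from by omega]
        rfl
      rw [hprev]
      have hread : max (dAprev K (wendf train K) (2*K) (dA K (wendf train K) K (fun _ => 0)) (s + (T:Int)).toNat)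
            ((dA K (wendf train K) K (fun _ => 0)) ((s + (T:Int) - (K:Int)).toNat) + psum train (s + (T:Int)).toNat -
              if (K:Int) ≤ s + (T:Int) then PySem.List.pyGetD (fullRow N (psum train)) (s + (T:Int) - (K:Int)) 0 else 0)
          = dA K (wendf train K) (2*K) (dA K (wendf train K) K (fun _ => 0)) (s + (T:Int)).toNat := by
        rw [dA_active K (wendf train K) (2*K) (dA K (wendf train K) K (fun _ => 0)) (s + (T:Int)).toNat (by omega), hsubst]
        congr 1
        rw [show (s + (T:Int) - (K:Int)).toNat = (s + (T:Int)).toNat - K from by omega]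
        unfold wendf
        omega
      rw [hread, rowOf, set_map_range]
      apply List.map_congr_left
      intro idx hidx
      simp only [List.mem_range] at hidx
      by_cases hi : idx = (s + (T:Int)).toNat
      · subst hi
        rw [if_pos rfl, if_pos (by push_cast; omega)]
      · rw [if_neg hi]
        by_cases hlt : (idx:Int) < s + (T:Int)
        · rw [if_pos hlt, if_pos (by push_cast; omega)]
        · rw [if_neg hlt, if_neg (by push_cast; omega)]

-- one pass of A's dp loop, level i=2
theorem level2_aux (train : List Int) (n : Int) (N K : Nat) (hN : N = n.toNat)
    (h1 : 1 ≤ n) (h2 : n ≤ (train.length : Int)) (hK : 1 ≤ K) (s : Int) (hs : s = 3*(K:Int) - 1)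
    (T : Nat) (hT : 0 < T → s + (T:Int) ≤ n) :
    (List.range T).foldl (fun dpa (k : Nat) =>
      dpa.set (2:Int).toNat
        ((PySem.List.pyGetD dpa 2 []).set (s + (k:Int)).toNat
          (max (PySem.List.pyGetD (PySem.List.pyGetD dpa 2 []) (s + (k:Int) - 1) 0)
            ((if (K:Int) ≤ s + (k:Int) then
                PySem.List.pyGetD (PySem.List.pyGetD dpa ((2:Int)-1) []) (s + (k:Int) - (K:Int)) 0
              else 0)
              + PySem.List.pyGetD (fullRow N (psum train)) (s + (k:Int)) 0
              - (if (K:Int) ≤ s + (k:Int) then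
                  PySem.List.pyGetD (fullRow N (psum train)) (s + (k:Int) - (K:Int)) 0
                else 0)))))
      [fullRow N (dA K (wendf train K) K (fun _ => 0)), fullRow N (dA K (wendf train K) (2*K) (dA K (wendf train K) K (fun _ => 0))), zeroRow N]
    = [fullRow N (dA K (wendf train K) K (fun _ => 0)), fullRow N (dA K (wendf train K) (2*K) (dA K (wendf train K) K (fun _ => 0))), rowOf N (dA K (wendf train K) (3*K) (dA K (wendf train K) (2*K) (dA K (wendf train K) K (fun _ => 0)))) (s + (T:Int))] := by
  induction T with
  | zero =>
      simp only [List.range_zero, List.foldl_nil]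
      rw [rowOf_init N _ (s + ((0:Nat):Int)) (fun idx hidx => dA_zero_of_lt K _ _ _ idx (by omega))]
  | succ T ih =>
      rw [List.range_succ, List.foldl_append, ih (fun _ => by
        have := hT (by omega); push_cast at this ⊢; omega)]
      simp only [List.foldl_cons, List.foldl_nil]
      have hjlt : s + (T:Int) < n := by have := hT (by omega); push_cast at this; omega
      have hj1 : (1:Int) ≤ s + (T:Int) := by omega
      rw [get3_2, get3_sub2, set3_2]
      rw [if_pos (show (K:Int) ≤ s + (T:Int) from by omega)]
      rw [fullRow_getD N (dA K (wendf train K) (2*K) (dA K (wendf train K) K (fun _ => 0))) (s + (T:Int) - (K:Int)) (by omega) (by omega)]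
      rw [fullRow_getD N (psum train) (s + (T:Int)) (by omega) (by omega)]
      simp only [List.cons.injEq, eq_self_iff_true, true_and, and_true]
      have hsubst : (if (K:Int) ≤ s + (T:Int) then PySem.List.pyGetD (fullRow N (psum train)) (s + (T:Int) - (K:Int)) 0 else 0)
          = (if K ≤ (s + (T:Int)).toNat then psum train ((s + (T:Int)).toNat - K) else 0) := by
        rw [if_pos (show (K:Int) ≤ s + (T:Int) from by omega), if_pos (by omega),
          fullRow_getD N _ _ (by omega) (by omega)]
        congr 1
        omega
      have hprev : PySem.List.pyGetD (rowOf N (dA K (wendf train K) (3*K) (dA K (wendf train K) (2*K) (dA K (wendf train K) K (fun _ => 0)))) (s + (T:Int))) (s + (T:Int) - 1) 0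
          = dAprev K (wendf train K) (3*K) (dA K (wendf train K) (2*K) (dA K (wendf train K) K (fun _ => 0))) (s + (T:Int)).toNat := by
        rw [rowOf_getD N _ _ _ (by omega) (by omega), if_pos (by omega)]
        rw [show (s + (T:Int)).toNat = (s + (T:Int) - 1).toNat + 1 from by omega]
        rfl
      rw [hprev]
      have hread : max (dAprev K (wendf train K) (3*K) (dA K (wendf train K) (2*K) (dA K (wendf train K) K (fun _ => 0))) (s + (T:Int)).toNat)
            ((dA K (wendf train K) (2*K) (dA K (wendf train K) K (fun _ => 0))) ((s + (T:Int) - (K:Int)).toNat) + psum train (s + (T:Int)).toNat -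
              if (K:Int) ≤ s + (T:Int) then PySem.List.pyGetD (fullRow N (psum train)) (s + (T:Int) - (K:Int)) 0 else 0)
          = dA K (wendf train K) (3*K) (dA K (wendf train K) (2*K) (dA K (wendf train K) K (fun _ => 0))) (s + (T:Int)).toNat := by
        rw [dA_active K (wendf train K) (3*K) (dA K (wendf train K) (2*K) (dA K (wendf train K) K (fun _ => 0))) (s + (T:Int)).toNat (by omega), hsubst]
        congr 1
        rw [show (s + (T:Int) - (K:Int)).toNat = (s + (T:Int)).toNat - K from by omega]
        unfold wendf
        omega
      rw [hread, rowOf, set_map_range]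
      apply List.map_congr_left
      intro idx hidx
      simp only [List.mem_range] at hidx
      by_cases hi : idx = (s + (T:Int)).toNat
      · subst hi
        rw [if_pos rfl, if_pos (by push_cast; omega)]
      · rw [if_neg hi]
        by_cases hlt : (idx:Int) < s + (T:Int)
        · rw [if_pos hlt, if_pos (by push_cast; omega)]
        · rw [if_neg hlt, if_neg (by push_cast; omega)]

theorem loop_eq_dA' (n : Int) (train : List Int) (sublen : Int)
    (hp : Pre_loop n train sublen) :
    loop n train sublen =
      dA sublen.toNat (wendf train sublen.toNat) (3 * sublen.toNat)
        (dA sublen.toNat (wendf train sublen.toNat) (2 * sublen.toNat)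
          (dA sublen.toNat (wendf train sublen.toNat) sublen.toNat (fun _ => 0)))
        ((n - 1).toNat) := by
  obtain ⟨h1, h2, h3⟩ := hp
  obtain ⟨K, hKeq⟩ : ∃ K : Nat, (K:Int) = sublen := ⟨sublen.toNat, Int.toNat_of_nonneg (by omega)⟩
  subst hKeq
  have hKp : 1 ≤ K := by omega
  simp only [Int.toNat_natCast]
  simp only [loop]
  rw [show List.replicate 3 (List.replicate n.toNat (0:Int)) = [zeroRow n.toNat, zeroRow n.toNat, zeroRow n.toNat] from by
    rw [zeroRow_eq_replicate]; rfl]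
  rw [prefix_char train n h1 h2]
  rw [show (List.range n.toNat).map (psum train) = fullRow n.toNat (psum train) from rfl]
  rw [show PySem.List.pyRange 0 3 1 = [0,1,2] from by decide]
  simp only [List.foldl_cons, List.foldl_nil, Int.toNat_natCast]
  rw [show ((0:Int)+1)*(K:Int)-1 = (K:Int)-1 from by ring]
  rw [show ((1:Int)+1)*(K:Int)-1 = 2*(K:Int)-1 from by ring]
  rw [show ((2:Int)+1)*(K:Int)-1 = 3*(K:Int)-1 from by ring]
  simp only [PySem.List.pyRange_one, List.foldl_map]
  rw [level0_aux train n n.toNat K rfl h1 h2 hKp ((K:Int)-1) rfl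
    ((n - ((K:Int)-1)).toNat) (fun _ => by omega)]
  rw [rowOf_full n.toNat _ _ (by omega)]
  rw [level1_aux train n n.toNat K rfl h1 h2 hKp (2*(K:Int)-1) rfl
    ((n - (2*(K:Int)-1)).toNat) (fun _ => by omega)]
  rw [rowOf_full n.toNat _ _ (by omega)]
  rw [level2_aux train n n.toNat K rfl h1 h2 hKp (3*(K:Int)-1) rfl
    ((n - (3*(K:Int)-1)).toNat) (fun _ => by omega)]
  rw [rowOf_full n.toNat _ _ (by omega)]
  rw [get3_2, fullRow_getD n.toNat _ (n-1) (by omega) (by omega)]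

-- ---------- A-side characterizations ----------
theorem d0_cmax (train : List Int) (K : Nat) (hK : 1 ≤ K) (j : Nat) :
    IsCMax (S1 (wsf train K) 0 (j + 2 - K)) (dA K (wendf train K) K (fun _ => 0) j) := by
  induction j with
  | zero =>
      by_cases h : 2 ≤ K
      · rw [dA_zero_of_lt K _ K _ 0 (by omega), S1_empty _ _ _ (by omega)]
        exact cmax_empty
      · rw [dA_active K _ K _ 0 (by omega)]
        simp only [dAprev, zero_add]
        rw [wend_eq_ws train K hK 0 (by omega), show 0 + 1 - K = 0 from by omega,
          show 0 + 2 - K = 0 + 1 from by omega, S1_snoc _ 0 0 (le_refl 0),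
          S1_empty _ 0 0 (le_refl 0), Set.empty_union]
        exact cmax_max_zero (nmax_singleton _)
  | succ j ih =>
      by_cases h : j + 3 ≤ K
      · rw [dA_zero_of_lt K _ K _ (j+1) (by omega), S1_empty _ _ _ (by omega)]
        exact cmax_empty
      · rw [dA_active K _ K _ (j+1) (by omega)]
        simp only [dAprev, zero_add]
        rw [wend_eq_ws train K hK (j+1) (by omega), show j + 1 + 1 - K = j + 2 - K from by omega,
          show j + 1 + 2 - K = (j + 2 - K) + 1 from by omega,
          S1_snoc _ 0 (j + 2 - K) (by omega)]
        exact cmax_union_nmax ih (nmax_singleton _)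

theorem d1_cmax (train : List Int) (K : Nat) (hK : 1 ≤ K) (j : Nat) :
    IsCMax (S1 (wsf train K) K (j + 2 - K) ∪ S2 (wsf train K) K 0 (j + 2 - K) (j + 2 - K))
      (dA K (wendf train K) (2*K) (dA K (wendf train K) K (fun _ => 0)) j) := by
  induction j with
  | zero =>
      rw [dA_zero_of_lt K _ (2*K) _ 0 (by omega), S1_empty _ _ _ (by omega),
        S2_empty _ _ _ _ _ (by omega), Set.union_empty]
      exact cmax_empty
  | succ j ih =>
      by_cases h : j + 3 ≤ 2*K
      · rw [dA_zero_of_lt K _ (2*K) _ (j+1) (by omega), S1_empty _ _ _ (by omega),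
          S2_empty _ _ _ _ _ (by omega), Set.union_empty]
        exact cmax_empty
      · rw [dA_active K _ (2*K) _ (j+1) (by omega)]
        simp only [dAprev]
        rw [wend_eq_ws train K hK (j+1) (by omega), show j + 1 + 1 - K = j + 2 - K from by omega]
        have hd0 := d0_cmax train K hK (j+1-K)
        rw [show j + 1 - K + 2 - K = j + 3 - 2*K from by omega] at hd0
        have hnew := nmax_cshift (wsf train K (j + 2 - K)) hd0
        have hcomb := cmax_union_nmax ih hnew
        rw [show j + 1 + 2 - K = j + 3 - K from by omega]
        exact cmax_congr (d1_step_sets (wsf train K) K j hK (by omega)) hcomb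

theorem d2_cmax (train : List Int) (K : Nat) (hK : 1 ≤ K) (j : Nat) :
    IsCMax (S1 (wsf train K) (2*K) (j + 2 - K) ∪
            S2 (wsf train K) K K (j + 2 - K) (j + 2 - K) ∪
            S3 (wsf train K) K (j + 2 - K) (j + 2 - K))
      (dA K (wendf train K) (3*K)
        (dA K (wendf train K) (2*K) (dA K (wendf train K) K (fun _ => 0))) j) := by
  induction j with
  | zero =>
      rw [dA_zero_of_lt K _ (3*K) _ 0 (by omega), S1_empty _ _ _ (by omega),
        S2_empty _ _ _ _ _ (by omega), S3_empty _ _ _ _ (by omega), Set.union_empty,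
        Set.union_empty]
      exact cmax_empty
  | succ j ih =>
      by_cases h : j + 3 ≤ 3*K
      · rw [dA_zero_of_lt K _ (3*K) _ (j+1) (by omega), S1_empty _ _ _ (by omega),
          S2_empty _ _ _ _ _ (by omega), S3_empty _ _ _ _ (by omega), Set.union_empty,
          Set.union_empty]
        exact cmax_empty
      · rw [dA_active K _ (3*K) _ (j+1) (by omega)]
        simp only [dAprev]
        rw [wend_eq_ws train K hK (j+1) (by omega), show j + 1 + 1 - K = j + 2 - K from by omega]
        have hd1 := d1_cmax train K hK (j+1-K)
        rw [show j + 1 - K + 2 - K = j + 3 - 2*K from by omega] at hd1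
        have hnew := nmax_cshift (wsf train K (j + 2 - K)) hd1
        have hcomb := cmax_union_nmax ih hnew
        rw [show j + 1 + 2 - K = j + 3 - K from by omega]
        exact cmax_congr (d2_step_sets (wsf train K) K j hK (by omega)) hcomb

-- A's port equals the recurrence value at n-1
theorem loop_eq_dA (n : Int) (train : List Int) (sublen : Int)
    (hp : Pre_loop n train sublen) :
    loop n train sublen =
      dA sublen.toNat (wendf train sublen.toNat) (3 * sublen.toNat)
        (dA sublen.toNat (wendf train sublen.toNat) (2 * sublen.toNat)
          (dA sublen.toNat (wendf train sublen.toNat) sublen.toNat (fun _ => 0)))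
        (n.toNat - 1) := by
  rw [show n.toNat - 1 = (n-1).toNat from by unfold Pre_loop at hp; omega]
  exact loop_eq_dA' n train sublen hp

-- ---------- B-side characterizations ----------
theorem pmax_nmax (ws : Nat → Int) (u : Nat) : IsNMax (S1 ws 0 (u + 1)) (pmax ws u) := by
  induction u with
  | zero =>
      constructor
      · exact ⟨0, by omega, by omega, rfl⟩
      · rintro x ⟨u, _, hu, rfl⟩
        have : u = 0 := by omega
        subst this; simp [pmax]
  | succ u ih =>
      have h2 : IsNMax ({ws (u+1)} : Set Int) (ws (u+1)) :=
        ⟨rfl, by rintro x rfl; exact le_refl _⟩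
      have h3 := nmax_union ih h2
      have hset : S1 ws 0 (u+1) ∪ {ws (u+1)} = S1 ws 0 (u+1+1) := by
        ext x
        simp only [S1, Set.mem_union, Set.mem_singleton_iff, Set.mem_setOf_eq]
        constructor
        · rintro (⟨v, hv1, hv2, rfl⟩ | rfl)
          · exact ⟨v, by omega, by omega, rfl⟩
          · exact ⟨u+1, by omega, by omega, rfl⟩
        · rintro ⟨v, hv1, hv2, rfl⟩
          by_cases hv : v = u + 1
          · subst hv; exact Or.inr rfl
          · exact Or.inl ⟨v, by omega, by omega, rfl⟩
      rw [hset] at h3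
      simpa [pmax] using h3

theorem xs_getD (train : List Int) (N i : Nat) (hi : i < N) (hN : N ≤ train.length) :
    PySem.List.pyGetD (List.take N train) ((i:Nat):Int) 0 = train[i]'(by omega) := by
  rw [PySem.List.pyGetD_natCast, List.getD_eq_getElem _ _ (by simp [List.length_take]; omega)]
  simp [List.getElem_take]

theorem wsf_step (train : List Int) (K : Nat) (hK : 1 ≤ K) (u : Nat) (h : u + K < train.length) :
    wsf train K (u+1) = wsf train K u + train[u+K] - train[u]'(by omega) := by
  have h1 := psum_succ train (u+K-1) (by omega)
  simp only [show u+K-1+1 = u+K from by omega] at h1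
  unfold wsf
  rw [if_pos (by omega : 1 ≤ u+1)]
  rw [show u+1+K-1 = u+K from by omega, show u+1-1 = u from rfl]
  by_cases hu : 1 ≤ u
  · rw [if_pos hu]
    have h2 := psum_succ train (u-1) (by omega)
    simp only [show u-1+1 = u from by omega] at h2
    omega
  · have hu0 : u = 0 := by omega
    subst hu0
    rw [if_neg (by omega)]
    have h0 := psum_zero train (by omega)
    simp only [show 0+K-1 = K-1 from by omega, show 0+K = K from by omega] at *
    omega

theorem w0_sum (train : List Int) (n : Int) (K : Nat) (hK : 1 ≤ K) (hKn : (K:Int) ≤ n)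
    (hNl : n ≤ (train.length:Int)) :
    ((List.take n.toNat train).take K).sum = wsf train K 0 := by
  rw [List.take_take, show min K n.toNat = K from by omega]
  unfold wsf psum
  rw [if_neg (by omega), show 0+K-1+1 = K from by omega]
  omega

theorem map_range_getLast (f : Nat → Int) (T : Nat) (h : (List.range (T+1)).map f ≠ []) :
    ((List.range (T+1)).map f).getLast h = f T := by
  rw [List.getLast_eq_getElem]
  simp

theorem map_range_getLast' (f : Nat → Int) (M : Nat) (h : (List.range M).map f ≠ []) :
    ((List.range M).map f).getLast h = f (M-1) := by
  rw [List.getLast_eq_getElem]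
  simp

-- B's sliding-window pass
theorem w_fold (train : List Int) (n : Int) (K M : Nat) (hK : 1 ≤ K) (h1 : 1 ≤ n)
    (hNl : n ≤ (train.length:Int)) (hM : (M:Int) = n - (K:Int) + 1) (T : Nat) (hT : T + 1 ≤ M) :
    (List.range T).foldl (fun (w : List Int) (k : Nat) =>
      w ++ [PySem.List.pyGetD w (-1) 0 +
        PySem.List.pyGetD (List.take n.toNat train) (1 + (k:Int) + (K:Int) - 1) 0 -
        PySem.List.pyGetD (List.take n.toNat train) (1 + (k:Int) - 1) 0])
      [wsf train K 0]
    = (List.range (T+1)).map (wsf train K) := by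
  induction T with
  | zero => simp
  | succ T ih =>
      rw [List.range_succ, List.foldl_append, ih (by omega)]
      simp only [List.foldl_cons, List.foldl_nil]
      rw [PySem.List.pyGetD_neg_one _ _ (by simp), map_range_getLast]
      have e1 : (1:Int) + (T:Int) + (K:Int) - 1 = ((T+K : Nat):Int) := by push_cast; ring
      have e2 : (1:Int) + (T:Int) - 1 = ((T : Nat):Int) := by push_cast; ring
      rw [e1, e2, xs_getD train n.toNat (T+K) (by omega) (by omega),
        xs_getD train n.toNat T (by omega) (by omega)]
      rw [List.range_succ (n := T+1), List.map_append, ← wsf_step train K hK T (by omega)]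
      rfl

theorem pre_fold (ws : Nat → Int) (M T : Nat) (hT : T + 1 ≤ M) :
    (List.range T).foldl (fun pre (k : Nat) =>
      pre ++ [max (PySem.List.pyGetD pre (-1) 0)
        (PySem.List.pyGetD ((List.range M).map ws) (1 + (k:Int)) 0)])
      [PySem.List.pyGetD ((List.range M).map ws) 0 0]
    = (List.range (T+1)).map (pmax ws) := by
  induction T with
  | zero =>
      rw [PySem.List.pyGetD_zero, List.getD_eq_getElem _ _ (by simp; omega)]
      simp [pmax]
  | succ T ih =>
      rw [List.range_succ, List.foldl_append, ih (by omega)]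
      simp only [List.foldl_cons, List.foldl_nil]
      rw [PySem.List.pyGetD_neg_one _ _ (by simp), map_range_getLast]
      rw [show (1:Int) + (T:Int) = ((T+1 : Nat):Int) from by push_cast; ring,
        PySem.List.pyGetD_natCast, getD_map_range' _ _ (by omega)]
      rw [List.range_succ (n := T+1), List.map_append]
      rfl

theorem rev_fold (ws : Nat → Int) (n : Int) (K M T : Nat) (hM : (M:Int) = n - (K:Int) + 1)
    (hM1 : 1 ≤ M) (hT : T ≤ M - 1) :
    (List.range T).foldl (fun rv (k : Nat) =>
      rv ++ [max (PySem.List.pyGetD rv (-1) 0)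
        (PySem.List.pyGetD ((List.range M).map ws) (n - (K:Int) + 1 - 2 - (k:Int)) 0)])
      [PySem.List.pyGetD ((List.range M).map ws) (-1) 0]
    = (List.range (T+1)).map (revf ws (M-1)) := by
  induction T with
  | zero =>
      rw [PySem.List.pyGetD_neg_one _ _ (by simp; omega), map_range_getLast']
      simp [revf]
  | succ T ih =>
      rw [List.range_succ, List.foldl_append, ih (by omega)]
      simp only [List.foldl_cons, List.foldl_nil]
      rw [PySem.List.pyGetD_neg_one _ _ (by simp), map_range_getLast]
      rw [show n - (K:Int) + 1 - 2 - (T:Int) = ((M-2-T : Nat):Int) from by omega,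
        PySem.List.pyGetD_natCast, getD_map_range' _ _ (by omega)]
      rw [List.range_succ (n := T+1), List.map_append]
      have : revf ws (M-1) (T+1) = max (revf ws (M-1) T) (ws (M-1-(T+1))) := rfl
      rw [show M-2-T = M-1-(T+1) from by omega]
      rfl

theorem suf_getD (ws : Nat → Int) (M u : Nat) (hu : u < M) :
    PySem.List.pyGetD ((List.range M).map (revf ws (M-1))).reverse ((u:Nat):Int) 0
      = revf ws (M-1) (M-1-u) := by
  rw [PySem.List.pyGetD_natCast, List.getD_eq_getElem _ _ (by simp; omega)]
  rw [List.getElem_reverse]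
  simp only [List.getElem_map, List.getElem_range, List.length_map, List.length_range]

theorem revf_nmax (ws : Nat → Int) (M : Nat) (hM : 1 ≤ M) (k : Nat) (hk : k ≤ M-1) :
    IsNMax (S1 ws (M-1-k) M) (revf ws (M-1) k) := by
  induction k with
  | zero =>
      constructor
      · exact ⟨M-1, by omega, by omega, rfl⟩
      · rintro x ⟨u, h1, h2, rfl⟩
        have : u = M-1 := by omega
        subst this
        exact le_refl _
  | succ k ih =>
      have h2 := nmax_union (ih (by omega)) (nmax_singleton (ws (M-1-(k+1))))
      have hset : S1 ws (M-1-k) M ∪ {ws (M-1-(k+1))} = S1 ws (M-1-(k+1)) M := by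
        ext x
        simp only [S1, Set.mem_union, Set.mem_singleton_iff, Set.mem_setOf_eq]
        constructor
        · rintro (⟨u, h1, h3, rfl⟩ | rfl)
          · exact ⟨u, by omega, h3, rfl⟩
          · exact ⟨M-1-(k+1), by omega, by omega, rfl⟩
        · rintro ⟨u, h1, h3, rfl⟩
          by_cases hu : u = M-1-(k+1)
          · subst hu; exact Or.inr rfl
          · exact Or.inl ⟨u, by omega, h3, rfl⟩
      rw [hset] at h2
      exact h2

theorem sufv_nmax (ws : Nat → Int) (M u : Nat) (hM : 1 ≤ M) (hu : u ≤ M-1) :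
    IsNMax (S1 ws u M) (revf ws (M-1) (M-1-u)) := by
  have := revf_nmax ws M hM (M-1-u) (by omega)
  rw [show M-1-(M-1-u) = u from by omega] at this
  exact this

-- one step of B's clamped middle sweep, as a max-distribution identity
theorem clamp_dist (b p wv s : Int) :
    max b (max (max p 0 + wv) 0 + s) = max b (max (max s (wv + s)) (p + wv + s)) := by
  rcases le_total p 0 with h | h <;> rcases le_total wv (-p) with h' | h' <;>
    rcases le_total wv 0 with h'' | h'' <;> omega

theorem best_fold (train : List Int) (n : Int) (K M : Nat) (hK : 1 ≤ K)
    (hM : (M:Int) = n - (K:Int) + 1) (hM1 : 1 ≤ M) (T : Nat) (hT : 0 < T → 2*K + T ≤ M) :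
    IsCMax ((if T = 0 then (∅ : Set Int) else S1 (wsf train K) (2*K) M) ∪
        S2 (wsf train K) K K (K+T) M ∪ S3 (wsf train K) K (K+T) M)
      ((List.range T).foldl (fun best (k : Nat) =>
        max best
          (max (max (PySem.List.pyGetD ((List.range M).map (pmax (wsf train K))) ((K:Int) + (k:Int) - (K:Int)) 0) 0 +
              PySem.List.pyGetD ((List.range M).map (wsf train K)) ((K:Int) + (k:Int)) 0) 0 +
            PySem.List.pyGetD ((List.range M).map (revf (wsf train K) (M-1))).reverse
              ((K:Int) + (k:Int) + (K:Int)) 0)) 0) := by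
  induction T with
  | zero =>
      rw [if_pos rfl, S2_empty_bu _ _ _ _ _ (by omega), S3_empty_bv _ _ _ _ (by omega),
        Set.empty_union, Set.union_empty]
      exact cmax_empty
  | succ T ih =>
      have hTT : 2*K + (T+1) ≤ M := hT (by omega)
      rw [List.range_succ, List.foldl_append]
      simp only [List.foldl_cons, List.foldl_nil]
      rw [show (K:Int) + (T:Int) - (K:Int) = ((T : Nat):Int) from by push_cast; ring,
        PySem.List.pyGetD_natCast ((List.range M).map (pmax (wsf train K))),
        getD_map_range' _ _ (by omega : T < M)]
      rw [show (K:Int) + (T:Int) = ((K+T : Nat):Int) from by push_cast; ring,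
        PySem.List.pyGetD_natCast ((List.range M).map (wsf train K)),
        getD_map_range' _ _ (by omega : K+T < M)]
      rw [show ((K+T : Nat):Int) + (K:Int) = ((2*K+T : Nat):Int) from by push_cast; ring,
        suf_getD (wsf train K) M (2*K+T) (by omega)]
      rw [clamp_dist]
      have hsuf := sufv_nmax (wsf train K) M (2*K+T) (by omega) (by omega)
      have hpair := nmax_shift_left (wsf train K (K+T)) hsuf
      have htrip := nmax_add_mid (wsf train K (K+T)) (pmax_nmax (wsf train K) T) hsuf
      have hcomb := cmax_union_nmax (ih (fun _ => by omega))
        (nmax_union (nmax_union hsuf hpair) htrip)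
      rw [show K+(T+1) = K+T+1 from by omega]
      exact cmax_congr (best_step_sets' (wsf train K) K M T hK (by omega)) hcomb

theorem loop_alt_cmax (n : Int) (train : List Int) (sublen : Int)
    (hp : Pre_loop n train sublen) :
    IsCMax (S1 (wsf train sublen.toNat) (2 * sublen.toNat) (n.toNat + 1 - sublen.toNat) ∪
            S2 (wsf train sublen.toNat) sublen.toNat sublen.toNat
              (n.toNat + 1 - sublen.toNat) (n.toNat + 1 - sublen.toNat) ∪
            S3 (wsf train sublen.toNat) sublen.toNat
              (n.toNat + 1 - sublen.toNat) (n.toNat + 1 - sublen.toNat))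
      (loop_alt n train sublen) := by
  obtain ⟨h1, h2, h3⟩ := hp
  obtain ⟨K, hKeq⟩ : ∃ K : Nat, (K:Int) = sublen := ⟨sublen.toNat, Int.toNat_of_nonneg (by omega)⟩
  subst hKeq
  simp only [Int.toNat_natCast]
  have hKp : 1 ≤ K := by omega
  simp only [loop_alt]
  by_cases hm : n - (K:Int) + 1 - (K:Int) ≤ (K:Int)
  · -- fewer than three windows fit: the middle sweep is empty and every set is empty
    rw [PySem.List.pyRange_one_eq_nil hm]
    simp only [List.foldl_nil]
    have hMle : n.toNat + 1 - K ≤ 2*K := by omega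
    rw [S1_empty _ _ _ (by omega), S2_empty _ _ _ _ _ (by omega), S3_empty _ _ _ _ (by omega),
      Set.union_empty, Set.union_empty]
    exact cmax_empty
  · have hM : ((n.toNat + 1 - K : Nat):Int) = n - (K:Int) + 1 := by omega
    have hM1 : 1 ≤ n.toNat + 1 - K := by omega
    rw [PySem.List.slice_to train (by omega : (0:Int) ≤ n)]
    rw [PySem.List.slice_to (List.take n.toNat train) (by omega : (0:Int) ≤ (K:Int))]
    simp only [Int.toNat_natCast]
    rw [w0_sum train n K hKp (by omega) h2]
    simp only [PySem.List.pyRange_one, PySem.List.pyRange_neg_one, List.foldl_map]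
    rw [w_fold train n K (n.toNat + 1 - K) hKp h1 h2 hM ((n - (K:Int) + 1 - 1).toNat) (by omega)]
    rw [show ((n - (K:Int) + 1 - 1).toNat) + 1 = n.toNat + 1 - K from by omega]
    rw [pre_fold (wsf train K) (n.toNat + 1 - K) ((n - (K:Int) + 1 - 1).toNat) (by omega)]
    rw [show ((n - (K:Int) + 1 - 1).toNat) + 1 = n.toNat + 1 - K from by omega]
    rw [rev_fold (wsf train K) n K (n.toNat + 1 - K) ((n - (K:Int) + 1 - 2 - -1).toNat) hM hM1
      (by omega)]
    rw [show ((n - (K:Int) + 1 - 2 - -1).toNat) + 1 = n.toNat + 1 - K from by omega]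
    have hfin := best_fold train n K (n.toNat + 1 - K) hKp hM hM1
      ((n - (K:Int) + 1 - (K:Int) - (K:Int)).toNat) (fun _ => by omega)
    rw [if_neg (by omega : ¬ (n - (K:Int) + 1 - (K:Int) - (K:Int)).toNat = 0)] at hfin
    rw [S2_eq_wide (wsf train K) K (K + (n - (K:Int) + 1 - (K:Int) - (K:Int)).toNat)
        (n.toNat + 1 - K) (n.toNat + 1 - K) (by omega) (by omega),
      S3_eq_wide (wsf train K) K (K + (n - (K:Int) + 1 - (K:Int) - (K:Int)).toNat)
        (n.toNat + 1 - K) (n.toNat + 1 - K) (by omega) (by omega)] at hfin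
    exact hfin

-- ===== VERDICT =====
theorem loop_spec : Claim_equal_loop := by
  intro n train sublen _ hp
  unfold Spec_loop
  have hA := loop_eq_dA n train sublen hp
  have hB := loop_alt_cmax n train sublen hp
  have hd2 := d2_cmax train sublen.toNat (by unfold Pre_loop at hp; omega) (n.toNat - 1)
  have hidx : n.toNat - 1 + 2 - sublen.toNat = n.toNat + 1 - sublen.toNat := by
    unfold Pre_loop at hp; omega
  rw [hidx] at hd2
  rw [hA]
  exact cmax_unique hd2 hB
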